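-- pv_equiv track=rewrite | github.com/Ximenzhengmo/pyShannon | channel.py | _build_symbol_table
-- ===== SOURCE A (Python) =====
-- def _build_symbol_table(x, symbol):
--     if symbol is None:
--         if x > 36:
--             raise ValueError("If `x > 36`, `symbol` must be provided.")
--         symbol = [str(i) for i in range(min(x, 10))]
--         if x > 10:
--             symbol += [chr(i) for i in range(ord('A'), ord('A') + x - 10)]
--     if len(symbol) != x:
--         raise ValueError("The length of `symbol` must be equal to `x`.")
--     return list(symbol)
-- ===== SOURCE B (Python) =====
-- CHARSET = "0123456789ABCDEFGHIJKLMNOPQRSTUVWXYZ"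
--
-- def _build_symbol_table(x, symbol):
--     if symbol is None:
--         if x > 36:
--             raise ValueError("If `x > 36`, `symbol` must be provided.")
--         symbol = list(CHARSET[:x])
--     if len(symbol) != x:
--         raise ValueError("The length of `symbol` must be equal to `x`.")
--     return list(symbol)
-- ===== Notes on version B (the rewrite author's own statement) =====
-- stated objective: simpler
-- what changed: The default table is a slice of one precomputed constant string CHARSET instead of being built by two range comprehensions (str(i) digits, then chr(i) letters) glued together.
import Mathlib
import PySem

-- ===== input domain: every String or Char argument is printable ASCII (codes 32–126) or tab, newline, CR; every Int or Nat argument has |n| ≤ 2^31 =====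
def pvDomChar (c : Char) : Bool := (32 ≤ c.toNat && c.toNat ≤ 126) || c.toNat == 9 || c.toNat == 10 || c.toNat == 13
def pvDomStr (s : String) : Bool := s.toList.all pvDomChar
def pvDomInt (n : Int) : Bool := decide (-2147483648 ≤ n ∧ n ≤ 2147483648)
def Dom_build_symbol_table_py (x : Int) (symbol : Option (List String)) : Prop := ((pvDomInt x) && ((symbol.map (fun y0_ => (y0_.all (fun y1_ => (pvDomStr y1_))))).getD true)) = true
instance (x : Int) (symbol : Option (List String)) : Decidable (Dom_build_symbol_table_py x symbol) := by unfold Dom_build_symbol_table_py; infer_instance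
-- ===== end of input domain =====

-- B replaces the two range comprehensions with a slice of one precomputed constant string (simpler; return value only, both raise outside Pre_).
-- ===== PORT A =====
def build_symbol_table_py (x : Int) (symbol : Option (List String)) : List String :=
  match symbol with
  | some s => s
  | none =>
    let digits := (PySem.List.pyRange 0 (min x 10) 1).map PySem.Int.toStr
    let tbl := if x > 10 then
        digits ++ (PySem.List.pyRange 65 (65 + x - 10) 1).map (fun i => String.ofList [Char.ofNat i.toNat])
      else digits
    tbl

-- ===== PORT B =====
def pvCharset : List Char := "0123456789ABCDEFGHIJKLMNOPQRSTUVWXYZ".toList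

def build_symbol_table_py_alt (x : Int) (symbol : Option (List String)) : List String :=
  match symbol with
  | some s => s
  | none => (PySem.List.slice pvCharset none (some x)).map (fun c => String.ofList [c])

-- ===== PRECONDITION & SPEC =====
-- Pre_ excludes exactly the inputs where A raises ValueError: symbol=None with x outside 0..36, or a provided symbol whose length differs from x.
def Pre_build_symbol_table_py (x : Int) (symbol : Option (List String)) : Prop :=
  (symbol = none → 0 ≤ x ∧ x ≤ 36) ∧ (∀ s, symbol = some s → (s.length : Int) = x)
instance (x : Int) (symbol : Option (List String)) : Decidable (Pre_build_symbol_table_py x symbol) := by unfold Pre_build_symbol_table_py; infer_instance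
def pvWitness_build_symbol_table_py : Int × Option (List String) := (13, none)

def Spec_build_symbol_table_py (x : Int) (symbol : Option (List String)) (out : List String) : Prop := out = build_symbol_table_py_alt x symbol
instance (x : Int) (symbol : Option (List String)) (out : List String) : Decidable (Spec_build_symbol_table_py x symbol out) := by unfold Spec_build_symbol_table_py; infer_instance

-- ===== CLAIM (what is proved, stated in full; the proofs are below) =====
def Claim_equal_build_symbol_table_py : Prop := ∀ (x : Int) (symbol : Option (List String)), Dom_build_symbol_table_py x symbol → Pre_build_symbol_table_py x symbol → Spec_build_symbol_table_py x symbol (build_symbol_table_py x symbol)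

-- ===== LEMMAS AND PROOFS =====

-- ===== VERDICT (by name: the statement is the Claim_ definition above) =====
theorem build_symbol_table_py_spec : Claim_equal_build_symbol_table_py := by
  intro x symbol _ hpre
  unfold Spec_build_symbol_table_py
  match symbol with
  | some s => rfl
  | none =>
    obtain ⟨h0, h1⟩ := hpre.1 rfl
    interval_cases x <;> decide
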